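-- pv_equiv track=rewrite | github.com/Alpacas2021MV/CS0-Alpacas2021MV | Assignments/Falling Apart/fallingapart.py | my_output
-- ===== SOURCE A (Python) =====
-- def my_output(my_nums):
--     alice = 0
--     bob = 0
--     alice_turn = True
--     #https://github.com/KentGrigo/Kattis/blob/master/python/fallingapart.py Got the code below from here.
--     for nums in my_nums:
--         if alice_turn:
--             alice += nums
--         else:
--             bob += nums
--         alice_turn = not alice_turn
--     return alice, bob
-- ===== SOURCE B (Python) =====
-- def my_output(my_nums):
--     # two-at-a-time index loop: one element for each total per iteration, no turn flag
--     alice = 0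
--     bob = 0
--     n = len(my_nums)
--     i = 0
--     while i + 1 < n:
--         alice += my_nums[i]
--         bob += my_nums[i + 1]
--         i += 2
--     if i < n:
--         alice += my_nums[i]
--     return (alice, bob)
-- ===== Notes on version B (the rewrite author's own statement) =====
-- stated objective: alternative
-- what changed: Replaces the toggle-flag single-element loop with a two-at-a-time index loop that adds one element to each running total per iteration, plus a trailing odd-element step; no turn flag is maintained.
import Mathlib
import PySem

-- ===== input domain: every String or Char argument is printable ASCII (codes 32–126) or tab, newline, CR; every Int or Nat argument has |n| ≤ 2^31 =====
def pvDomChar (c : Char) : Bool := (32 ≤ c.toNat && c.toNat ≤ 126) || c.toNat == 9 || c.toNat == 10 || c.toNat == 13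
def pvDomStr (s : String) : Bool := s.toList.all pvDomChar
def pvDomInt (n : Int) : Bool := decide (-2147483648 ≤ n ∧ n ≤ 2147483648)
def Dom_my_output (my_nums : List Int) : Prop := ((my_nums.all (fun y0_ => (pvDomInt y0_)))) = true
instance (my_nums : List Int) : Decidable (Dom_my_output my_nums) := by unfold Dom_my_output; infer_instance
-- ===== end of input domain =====

-- B replaces A's toggle-flag loop with a two-at-a-time index loop (one element per total per step); alternative decomposition, same cost.


-- ===== PORT A =====
-- A: fold over the list with state (alice, bob, alice_turn), toggling the flag each element.
def my_output (my_nums : List Int) : Int × Int :=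
  let s := my_nums.foldl
    (fun (st : Int × Int × Bool) nums =>
      if st.2.2 then (st.1 + nums, st.2.1, !st.2.2) else (st.1, st.2.1 + nums, !st.2.2))
    (0, 0, true)
  (s.1, s.2.1)

-- ===== PORT B =====
-- B's while loop: index i advances by 2, adding my_nums[i] to alice and my_nums[i+1] to bob;
-- the loop guard keeps both indices in range, so pyGetD (default 0) is exact here.
def myOutputGo (xs : List Int) (n alice bob i : Int) : Int × Int :=
  if i + 1 < n then
    myOutputGo xs n (alice + PySem.List.pyGetD xs i 0) (bob + PySem.List.pyGetD xs (i + 1) 0) (i + 2)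
  else if i < n then (alice + PySem.List.pyGetD xs i 0, bob)
  else (alice, bob)
termination_by (n - i).toNat
decreasing_by omega

def my_output_alt (my_nums : List Int) : Int × Int :=
  myOutputGo my_nums (my_nums.length : Int) 0 0 0

-- ===== PRECONDITION & SPEC =====
def Spec_my_output (my_nums : List Int) (out : Int × Int) : Prop := out = my_output_alt my_nums
instance (my_nums : List Int) (out : Int × Int) : Decidable (Spec_my_output my_nums out) := by unfold Spec_my_output; infer_instance

-- ===== CLAIM (what is proved, stated in full; the proofs are below) =====
def Claim_equal_my_output : Prop := ∀ (my_nums : List Int), Dom_my_output my_nums → Spec_my_output my_nums (my_output my_nums)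

-- ===== LEMMAS AND PROOFS =====

-- reference: two-at-a-time pair sums
def pairSum : List Int → Int × Int
  | [] => (0, 0)
  | [x] => (x, 0)
  | x :: y :: rest => ((pairSum rest).1 + x, (pairSum rest).2 + y)

lemma foldA_eq (xs : List Int) : ∀ (a b : Int),
    xs.foldl
      (fun (st : Int × Int × Bool) nums =>
        if st.2.2 then (st.1 + nums, st.2.1, !st.2.2) else (st.1, st.2.1 + nums, !st.2.2))
      (a, b, true)
    = (a + (pairSum xs).1, b + (pairSum xs).2, decide (xs.length % 2 = 0)) := by
  induction xs using pairSum.induct with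
  | case1 => simp [pairSum]
  | case2 x => simp [pairSum]
  | case3 x y rest ih =>
      intro a b
      show List.foldl _ (a + x, b + y, true) rest = _
      rw [ih]
      simp only [pairSum, List.length_cons]
      refine Prod.ext (by ring) (Prod.ext (by ring) ?_)
      simp only [decide_eq_decide]
      omega

lemma go_eq (xs : List Int) : ∀ (k : Nat) (a b : Int), k ≤ xs.length →
    myOutputGo xs (xs.length : Int) a b (k : Int)
      = (a + (pairSum (xs.drop k)).1, b + (pairSum (xs.drop k)).2) := by
  suffices H : ∀ (m k : Nat) (a b : Int), xs.length - k = m → k ≤ xs.length →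
      myOutputGo xs (xs.length : Int) a b (k : Int)
        = (a + (pairSum (xs.drop k)).1, b + (pairSum (xs.drop k)).2) by
    intro k a b hk; exact H (xs.length - k) k a b rfl hk
  intro m
  induction m using Nat.strong_induction_on with
  | _ m ih =>
    intro k a b hm hk
    rw [myOutputGo]
    by_cases h1 : (k : Int) + 1 < (xs.length : Int)
    · have hklt : k + 1 < xs.length := by exact_mod_cast h1
      have h2 : ((k : Int) + 2) = ((k + 2 : Nat) : Int) := by push_cast; ring
      have h1' : ((k : Int) + 1) = ((k + 1 : Nat) : Int) := by push_cast; ring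
      have e1 : PySem.List.pyGetD xs (k : Int) 0 = xs[k] := by
        rw [PySem.List.pyGetD_natCast]
        simp [List.getD_eq_getElem?_getD, List.getElem?_eq_getElem (show k < xs.length by omega)]
      have e2 : PySem.List.pyGetD xs ((k : Int) + 1) 0 = xs[k + 1] := by
        rw [h1', PySem.List.pyGetD_natCast]
        simp [List.getD_eq_getElem?_getD, List.getElem?_eq_getElem (show k + 1 < xs.length by omega)]
      rw [if_pos h1, e1, e2, h2, ih (xs.length - (k + 2)) (by omega) (k + 2) _ _ rfl (by omega)]
      have hd : xs.drop k = xs[k] :: xs[k + 1] :: xs.drop (k + 2) := by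
        rw [List.drop_eq_getElem_cons (show k < xs.length by omega)]
        congr 1
        rw [List.drop_eq_getElem_cons (show k + 1 < xs.length by omega)]
      rw [hd]
      simp only [pairSum]
      refine Prod.ext (by ring) (by simp; ring)
    · rw [if_neg h1]
      by_cases h2 : (k : Int) < (xs.length : Int)
      · have hk2 : k + 1 = xs.length := by omega
        rw [if_pos h2]
        have hd : xs.drop k = [xs[k]] := by
          rw [List.drop_eq_getElem_cons (by omega)]
          simp [List.drop_eq_nil_of_le (by omega : xs.length ≤ k + 1)]
        have e1 : PySem.List.pyGetD xs (k : Int) 0 = xs[k] := by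
          rw [PySem.List.pyGetD_natCast]
          simp [List.getD_eq_getElem?_getD, List.getElem?_eq_getElem (show k < xs.length by omega)]
        rw [hd, e1]
        simp [pairSum]
      · have hk2 : k = xs.length := by omega
        rw [if_neg h2]
        simp [hk2, List.drop_eq_nil_of_le (le_refl xs.length), pairSum]

-- ===== VERDICT (by name: the statement is the Claim_ definition above) =====
theorem my_output_spec : Claim_equal_my_output := by
  intro xs _
  unfold Spec_my_output my_output my_output_alt
  have hA := foldA_eq xs 0 0
  have hB := go_eq xs 0 0 0 (Nat.zero_le _)
  simp only [Nat.cast_zero] at hB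
  simp [hA, hB]
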